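-- pv_equiv track=rewrite | github.com/rohit-upadhya/thesis_complete | src/dataset/scrappers/eng_pdf_parser.py | combine_adjacent_entries_with_same_link
-- ===== SOURCE A (Python) =====
-- def normalize_link(link):
--     if link and link.startswith('http:'):
--         return 'https:' + link[5:]
--     return link
--
-- def combine_adjacent_entries_with_same_link(results):
--     combined_results = []
--     if not results:
--         return combined_results
--
--     combined_text = results[0][0]
--     current_size = results[0][1]
--     current_font = results[0][2]
--     current_link = normalize_link(results[0][3])
--
--     for i in range(1, len(results)):
--         text, size, font, link = results[i]
--         link = normalize_link(link)
--         if link == current_link and current_link is not None: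
--             if text not in combined_text:
--                 combined_text += " " + text
--         else:
--             combined_results.append((combined_text, current_size, current_font, current_link))
--             combined_text = text
--             current_size = size
--             current_font = font
--             current_link = link
--
--     # Append the last combined result
--     combined_results.append((combined_text, current_size, current_font, current_link))
--
--     return combined_results
-- ===== SOURCE B (Python) =====
-- def normalize_link(link):
--     if link and link.startswith('http:'):
--         return 'https:' + link[5:]
--     return link
--
-- def combine_adjacent_entries_with_same_link(results):
--     # Group-at-a-time decomposition: an outer loop per output entry and an
--     # inner loop consuming the whole run of matching links, instead of one
--     # fold carrying (text, size, font, link) state across every element.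
--     out = []
--     i = 0
--     n = len(results)
--     while i < n:
--         text, size, font, link = results[i]
--         link = normalize_link(link)
--         i += 1
--         if link is None:
--             out.append((text, size, font, None))
--         else:
--             combined = text
--             while i < n and normalize_link(results[i][3]) == link:
--                 t = results[i][0]
--                 if t not in combined:
--                     combined += " " + t
--                 i += 1
--             out.append((combined, size, font, link))
--     return out
-- ===== Notes on version B (the rewrite author's own statement) =====
-- stated objective: alternative
-- what changed: Replaced A's single fold carrying a five-part mutable state (current text/size/font/link plus an output list flushed on link change) by a group-at-a-time decomposition: an outer loop emits one output tuple per run, an inner loop consumes the whole run of entries whose normalized link equals the run's (non-None) link, merging texts with the substring dedup.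
import Mathlib
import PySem

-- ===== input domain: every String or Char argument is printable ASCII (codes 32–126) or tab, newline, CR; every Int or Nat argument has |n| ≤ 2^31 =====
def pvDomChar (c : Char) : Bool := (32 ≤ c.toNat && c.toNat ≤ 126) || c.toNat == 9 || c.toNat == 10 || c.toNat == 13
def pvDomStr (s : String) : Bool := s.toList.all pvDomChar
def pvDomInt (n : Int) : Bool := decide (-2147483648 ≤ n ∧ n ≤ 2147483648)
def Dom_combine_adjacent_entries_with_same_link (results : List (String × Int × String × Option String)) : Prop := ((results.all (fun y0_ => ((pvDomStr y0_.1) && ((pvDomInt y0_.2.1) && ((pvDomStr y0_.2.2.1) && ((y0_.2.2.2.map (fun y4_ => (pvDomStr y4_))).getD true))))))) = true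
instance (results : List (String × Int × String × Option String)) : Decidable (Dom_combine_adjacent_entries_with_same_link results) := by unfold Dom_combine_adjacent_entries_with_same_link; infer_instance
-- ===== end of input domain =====

-- B replaces A's single fold over a five-part running state by a group-at-a-time
-- decomposition (outer loop per output entry, inner run-consuming loop); same cost,
-- alternative structure. Proved equal on the whole domain.

-- ===== PORT A =====
def pvNormalizeLink (link : Option String) : Option String :=
  match link with
  | none => none
  | some s =>
      if s ≠ "" ∧ PySem.Str.startswith s "http:" = true then
        some ("https:" ++ PySem.Str.slice s (some 5) none)
      else some s

-- the for-loop of A: state (combined_text, size, font, link) and the output accumulator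
def pvLoopA (rs : List (String × Int × String × Option String)) (ct : String) (cs : Int)
    (cf : String) (cl : Option String) (acc : List (String × Int × String × Option String)) :
    List (String × Int × String × Option String) :=
  match rs with
  | [] => acc ++ [(ct, cs, cf, cl)]
  | (t, s, f, l) :: rs =>
      if pvNormalizeLink l = cl ∧ cl ≠ none then
        pvLoopA rs (if PySem.Str.isIn t ct = true then ct else ct ++ " " ++ t) cs cf cl acc
      else
        pvLoopA rs t s f (pvNormalizeLink l) (acc ++ [(ct, cs, cf, cl)])

def combine_adjacent_entries_with_same_link (results : List (String × Int × String × Option String)) : List (String × Int × String × Option String) :=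
  match results with
  | [] => []
  | (t, s, f, l) :: rest => pvLoopA rest t s f (pvNormalizeLink l) []

-- ===== PORT B =====
-- merging one further entry of the current run into the combined text
def pvMergeText (ct : String) (e : String × Int × String × Option String) : String :=
  if PySem.Str.isIn e.1 ct = true then ct else ct ++ " " ++ e.1

def combine_adjacent_entries_with_same_link_alt (results : List (String × Int × String × Option String)) : List (String × Int × String × Option String) :=
  match results with
  | [] => []
  | (t, s, f, l) :: rest =>
    match pvNormalizeLink l with
    | none => (t, s, f, none) :: combine_adjacent_entries_with_same_link_alt rest
    | some v =>
        ((rest.takeWhile (fun e => decide (pvNormalizeLink e.2.2.2 = some v))).foldl pvMergeText t, s, f, some v) ::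
          combine_adjacent_entries_with_same_link_alt
            (rest.dropWhile (fun e => decide (pvNormalizeLink e.2.2.2 = some v)))
termination_by results.length
decreasing_by
  · simp
  · have := List.length_dropWhile_le (fun (e : String × Int × String × Option String) => decide (pvNormalizeLink e.2.2.2 = some v)) rest
    simp; omega

-- ===== PRECONDITION & SPEC =====
def Spec_combine_adjacent_entries_with_same_link (results : List (String × Int × String × Option String)) (out : List (String × Int × String × Option String)) : Prop := out = combine_adjacent_entries_with_same_link_alt results
instance (results : List (String × Int × String × Option String)) (out : List (String × Int × String × Option String)) : Decidable (Spec_combine_adjacent_entries_with_same_link results out) := by unfold Spec_combine_adjacent_entries_with_same_link; infer_instance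

-- ===== CLAIM (what is proved, stated in full; the proofs are below) =====
def Claim_equal_combine_adjacent_entries_with_same_link : Prop := ∀ (results : List (String × Int × String × Option String)), Dom_combine_adjacent_entries_with_same_link results → Spec_combine_adjacent_entries_with_same_link results (combine_adjacent_entries_with_same_link results)

-- ===== LEMMAS AND PROOFS =====

-- B's handling of the remaining input rs given A's current state (ct, cs, cf, cl)
def pvCont (ct : String) (cs : Int) (cf : String) (cl : Option String)
    (rs : List (String × Int × String × Option String)) : List (String × Int × String × Option String) :=
  match cl with
  | none => (ct, cs, cf, none) :: combine_adjacent_entries_with_same_link_alt rs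
  | some v =>
      ((rs.takeWhile (fun e => decide (pvNormalizeLink e.2.2.2 = some v))).foldl pvMergeText ct, cs, cf, some v) ::
        combine_adjacent_entries_with_same_link_alt
          (rs.dropWhile (fun e => decide (pvNormalizeLink e.2.2.2 = some v)))

theorem alt_cons (t : String) (s : Int) (f : String) (l : Option String)
    (rs : List (String × Int × String × Option String)) :
    combine_adjacent_entries_with_same_link_alt ((t, s, f, l) :: rs) = pvCont t s f (pvNormalizeLink l) rs := by
  rw [combine_adjacent_entries_with_same_link_alt]
  cases h : pvNormalizeLink l <;> simp [pvCont]

theorem loopA_acc (rs : List (String × Int × String × Option String)) :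
    ∀ (ct : String) (cs : Int) (cf : String) (cl : Option String) acc,
    pvLoopA rs ct cs cf cl acc = acc ++ pvLoopA rs ct cs cf cl [] := by
  induction rs with
  | nil => intro ct cs cf cl acc; simp [pvLoopA]
  | cons e rs ih =>
      obtain ⟨t, s, f, l⟩ := e
      intro ct cs cf cl acc
      simp only [pvLoopA]
      by_cases h : pvNormalizeLink l = cl ∧ cl ≠ none
      · rw [if_pos h, if_pos h]
        exact ih _ _ _ _ _
      · rw [if_neg h, if_neg h,
            ih _ _ _ _ (acc ++ [(ct, cs, cf, cl)]), ih _ _ _ _ ([] ++ [(ct, cs, cf, cl)])]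
        simp

theorem loopA_eq_cont (rs : List (String × Int × String × Option String)) :
    ∀ (ct : String) (cs : Int) (cf : String) (cl : Option String),
    pvLoopA rs ct cs cf cl [] = pvCont ct cs cf cl rs := by
  induction rs with
  | nil =>
      intro ct cs cf cl
      cases cl <;> simp [pvLoopA, pvCont, combine_adjacent_entries_with_same_link_alt]
  | cons e rs ih =>
      obtain ⟨t, s, f, l⟩ := e
      intro ct cs cf cl
      simp only [pvLoopA]
      by_cases h : pvNormalizeLink l = cl ∧ cl ≠ none
      · rw [if_pos h]
        obtain ⟨h1, h2⟩ := h
        obtain ⟨v, hv⟩ := Option.ne_none_iff_exists'.mp h2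
        subst hv
        have hm : (if PySem.Str.isIn t ct = true then ct else ct ++ " " ++ t)
            = pvMergeText ct (t, s, f, l) := rfl
        rw [hm, ih]
        simp only [pvCont, List.takeWhile_cons, List.dropWhile_cons]
        simp [h1]
      · rw [if_neg h, loopA_acc, ih]
        cases cl with
        | none => simp [pvCont, alt_cons]
        | some v =>
            have h1 : ¬ pvNormalizeLink l = some v := fun hx => h ⟨hx, by simp⟩
            simp [pvCont, h1, alt_cons]

-- ===== VERDICT (by name: the statement is the Claim_ definition above) =====
theorem combine_adjacent_entries_with_same_link_spec : Claim_equal_combine_adjacent_entries_with_same_link := by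
  intro results _
  unfold Spec_combine_adjacent_entries_with_same_link
  cases results with
  | nil => simp [combine_adjacent_entries_with_same_link, combine_adjacent_entries_with_same_link_alt]
  | cons e rest =>
      obtain ⟨t, s, f, l⟩ := e
      rw [show combine_adjacent_entries_with_same_link ((t, s, f, l) :: rest)
            = pvLoopA rest t s f (pvNormalizeLink l) [] from rfl,
          loopA_eq_cont, alt_cons]
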